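-- pv_equiv track=rewrite | github.com/RVogel101/hytools | hytools/linguistics/tools/transliteration.py | format_wa_latin_sentence
-- ===== SOURCE A (Python) =====
-- def format_wa_latin_sentence(latin_text: str, normalize_punctuation: bool = True, sentence_case: bool = True) -> str:
--     """
--     Format Western Armenian Latin output for readability: normalize punctuation (Armenian full stop ։ → .)
--     and apply sentence-case (capitalize first letter of each sentence).
--
--     Use after to_latin(..., "western") for display. Example:
--       to_latin("Տունը մեծ է։ Ան կը խօսի հայերէն։", "western")  → "dounu medz e։ an gu khosi hayeren։"
--       format_wa_latin_sentence(...)  → "Dounu medz e. An gu khosi hayeren."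
--     """
--     if not latin_text:
--         return ""
--     s = latin_text
--     if normalize_punctuation:
--         s = s.replace("\u0589", ".")  # Armenian full stop → period
--     if not sentence_case:
--         return s
--     # Capitalize first letter of the string and after sentence-ending punctuation (. ! ?)
--     out: list[str] = []
--     cap_next = True
--     for i, c in enumerate(s):
--         if cap_next and c.isalpha():
--             out.append(c.upper())
--             cap_next = False
--         else:
--             out.append(c)
--             if c in ".!?" and (i + 1 >= len(s) or s[i + 1].isspace() or s[i + 1] in ".!?"):
--                 cap_next = True
--     return "".join(out)
-- ===== SOURCE B (Python) =====
-- def _cap_first_alpha(seg: str) -> str: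
--     for i, c in enumerate(seg):
--         if c.isalpha():
--             return seg[:i] + c.upper() + seg[i+1:]
--     return seg
--
--
-- def format_wa_latin_sentence(latin_text: str, normalize_punctuation: bool = True, sentence_case: bool = True) -> str:
--     if not latin_text:
--         return ""
--     s = latin_text
--     if normalize_punctuation:
--         s = s.replace("\u0589", ".")
--     if not sentence_case:
--         return s
--     # cut into sentence segments: a segment ends right after '.', '!' or '?'
--     # followed by end-of-string, whitespace or another terminal
--     segments: list[str] = []
--     start = 0
--     for i, c in enumerate(s):
--         if c in ".!?" and (i + 1 >= len(s) or s[i + 1].isspace() or s[i + 1] in ".!?"):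
--             segments.append(s[start:i + 1])
--             start = i + 1
--     if start < len(s):
--         segments.append(s[start:])
--     return "".join(_cap_first_alpha(seg) for seg in segments)
-- ===== Notes on version B (the rewrite author's own statement) =====
-- stated objective: alternative
-- what changed: A's single stateful pass with a cap_next flag is replaced by cutting the text into sentence segments at terminal-punctuation boundaries, capitalizing the first letter of each segment independently, and concatenating.
import Mathlib
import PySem

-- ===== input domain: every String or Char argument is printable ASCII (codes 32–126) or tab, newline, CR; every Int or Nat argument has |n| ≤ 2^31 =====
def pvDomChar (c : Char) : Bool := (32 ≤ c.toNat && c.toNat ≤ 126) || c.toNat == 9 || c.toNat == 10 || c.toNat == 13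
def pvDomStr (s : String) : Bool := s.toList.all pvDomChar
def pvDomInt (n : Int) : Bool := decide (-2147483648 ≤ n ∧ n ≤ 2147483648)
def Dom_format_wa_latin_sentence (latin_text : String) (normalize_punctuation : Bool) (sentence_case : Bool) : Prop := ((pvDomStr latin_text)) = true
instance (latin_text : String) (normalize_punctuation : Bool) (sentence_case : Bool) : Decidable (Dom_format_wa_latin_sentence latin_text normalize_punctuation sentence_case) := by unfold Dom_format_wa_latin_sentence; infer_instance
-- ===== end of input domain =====

-- B rewrites A's single stateful pass as: cut the text into sentence segments at the
-- terminal-punctuation boundaries, capitalize the first letter of each segment, concatenate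
-- (objective: alternative decomposition; same cost).

-- ===== PORT A =====
-- 'c in ".!?"' for a single char c is exactly membership in these three chars
def pvIsTerm (c : Char) : Bool := decide (c ∈ (['.', '!', '?'] : List Char))

-- the loop body of A: state (out, cap_next), element (i, c) from enumerate(s)
def fwls_step (s : List Char) (st : List Char × Bool) (p : Int × Char) : List Char × Bool :=
  if st.2 && PySem.Chars.isalpha p.2 then (st.1 ++ [PySem.Chars.upperChar p.2], false)
  else
    (st.1 ++ [p.2],
      if pvIsTerm p.2 &&
          (decide ((s.length : Int) ≤ p.1 + 1) ||
            (match PySem.List.pyGet? s (p.1 + 1) with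
             | some d => PySem.Chars.isspace d || pvIsTerm d
             | none => false)) then true else st.2)

def format_wa_latin_sentence (latin_text : String) (normalize_punctuation : Bool) (sentence_case : Bool) : String :=
  if latin_text.toList.isEmpty then ""
  else
    let s := if normalize_punctuation then PySem.Str.replace latin_text "\u0589" "." else latin_text
    if !sentence_case then s
    else
      String.ofList ((PySem.List.enumerate s.toList 0).foldl (fwls_step s.toList) ([], true)).1

-- ===== PORT B =====
-- first alpha char of a segment uppercased, rest untouched
def fwls_capFirst : List Char → List Char
  | [] => []
  | c :: rest =>
      if PySem.Chars.isalpha c then PySem.Chars.upperChar c :: rest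
      else c :: fwls_capFirst rest

-- boundary lookahead: end-of-string, whitespace, or another terminal
def pvAtBoundary : List Char → Bool
  | [] => true
  | d :: _ => PySem.Chars.isspace d || pvIsTerm d

-- cut into segments, each ending right after a terminal at a boundary
def fwls_segs : List Char → List Char → List (List Char)
  | [], cur => if cur.isEmpty then [] else [cur]
  | c :: rest, cur =>
      if pvIsTerm c && pvAtBoundary rest then (cur ++ [c]) :: fwls_segs rest []
      else fwls_segs rest (cur ++ [c])

def format_wa_latin_sentence_alt (latin_text : String) (normalize_punctuation : Bool) (sentence_case : Bool) : String :=
  if latin_text.toList.isEmpty then ""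
  else
    let s := if normalize_punctuation then PySem.Str.replace latin_text "\u0589" "." else latin_text
    if !sentence_case then s
    else
      String.ofList ((fwls_segs s.toList []).map fwls_capFirst).flatten

-- ===== PRECONDITION & SPEC =====
def Spec_format_wa_latin_sentence (latin_text : String) (normalize_punctuation : Bool) (sentence_case : Bool) (out : String) : Prop := out = format_wa_latin_sentence_alt latin_text normalize_punctuation sentence_case
instance (latin_text : String) (normalize_punctuation : Bool) (sentence_case : Bool) (out : String) : Decidable (Spec_format_wa_latin_sentence latin_text normalize_punctuation sentence_case out) := by unfold Spec_format_wa_latin_sentence; infer_instance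

-- ===== CLAIM (what is proved, stated in full; the proofs are below) =====
def Claim_equal_format_wa_latin_sentence : Prop := ∀ (latin_text : String) (normalize_punctuation : Bool) (sentence_case : Bool), Dom_format_wa_latin_sentence latin_text normalize_punctuation sentence_case → Spec_format_wa_latin_sentence latin_text normalize_punctuation sentence_case (format_wa_latin_sentence latin_text normalize_punctuation sentence_case)

-- ===== LEMMAS AND PROOFS =====

-- common recursive reading of the sentence-case transform: cap = "capitalize next letter"
def fwlsGo (cap : Bool) : List Char → List Char
  | [] => []
  | c :: rest =>
      if cap && PySem.Chars.isalpha c then PySem.Chars.upperChar c :: fwlsGo false rest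
      else c :: fwlsGo (if pvIsTerm c && pvAtBoundary rest then true else cap) rest

-- ----- A's fold equals fwlsGo -----
lemma fwls_foldA (s : List Char) :
    ∀ (d : List Char) (k : Nat), s.drop k = d → ∀ (out : List Char) (cap : Bool),
      ((PySem.List.enumerate d (k : Int)).foldl (fwls_step s) (out, cap)).1
        = out ++ fwlsGo cap d := by
  intro d
  induction d with
  | nil => intro k _ out cap; simp [PySem.List.enumerate_nil, fwlsGo]
  | cons c d' ih =>
    intro k hk out cap
    have hk1 : s.drop (k + 1) = d' := by rw [← List.tail_drop, hk]; rfl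
    have hget : PySem.List.pyGet? s ((k : Int) + 1) = d'.head? := by
      have hc : ((k : Int) + 1) = ((k + 1 : Nat) : Int) := by push_cast; ring
      rw [hc, PySem.List.pyGet?_natCast, ← List.head?_drop, hk1]
    have hlen' : s.length - (k + 1) = d'.length := by
      have := congrArg List.length hk1; simpa using this
    have hlenk : s.length - k = d'.length + 1 := by
      have := congrArg List.length hk; simpa using this
    have hbnd :
        (decide ((s.length : Int) ≤ (k : Int) + 1) ||
          (match PySem.List.pyGet? s ((k : Int) + 1) with
           | some e => PySem.Chars.isspace e || pvIsTerm e
           | none => false)) = pvAtBoundary d' := by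
      rw [hget]
      cases d' with
      | nil =>
        have hlen : s.length = k + 1 := by simp at hlen'; omega
        have : ((s.length : Int) ≤ (k : Int) + 1) := by rw [hlen]; push_cast; omega
        simp [pvAtBoundary, this]
      | cons e d'' =>
        have hlt : k + 1 < s.length := by simp at hlen'; omega
        have : ¬ ((s.length : Int) ≤ (k : Int) + 1) := by
          omega
        simp [pvAtBoundary, this]
    rw [PySem.List.enumerate_cons, List.foldl_cons]
    have hcast : (k : Int) + 1 = ((k + 1 : Nat) : Int) := by push_cast; ring
    by_cases hca : (cap && PySem.Chars.isalpha c) = true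
    · have hstep : fwls_step s (out, cap) ((k : Int), c)
          = (out ++ [PySem.Chars.upperChar c], false) := by
        simp [fwls_step, hca]
      have hunf : fwlsGo cap (c :: d')
          = PySem.Chars.upperChar c :: fwlsGo false d' := by
        show (if (cap && PySem.Chars.isalpha c) = true then _ else _) = _
        rw [if_pos hca]
      rw [hstep, hcast, ih (k + 1) hk1, hunf]
      simp
    · have hca' : (cap && PySem.Chars.isalpha c) = false := by
        revert hca; cases h : (cap && PySem.Chars.isalpha c) <;> simp
      have hstep : fwls_step s (out, cap) ((k : Int), c)
          = (out ++ [c], if (pvIsTerm c && pvAtBoundary d') = true then true else cap) := by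
        simp [fwls_step, hca', hbnd]
      have hunf : fwlsGo cap (c :: d')
          = c :: fwlsGo (if (pvIsTerm c && pvAtBoundary d') = true then true else cap) d' := by
        show (if (cap && PySem.Chars.isalpha c) = true then _ else _) = _
        rw [if_neg (by simp [hca'])]
      rw [hstep, hcast, ih (k + 1) hk1, hunf]
      simp

-- ----- capFirst facts -----
lemma capFirst_no_alpha {cur : List Char} (h : cur.any PySem.Chars.isalpha = false) :
    fwls_capFirst cur = cur := by
  induction cur with
  | nil => rfl
  | cons c t ih =>
    rw [List.any_cons, Bool.or_eq_false_iff] at h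
    simp [fwls_capFirst, h.1, ih h.2]

lemma capFirst_append_nonalpha {cur : List Char} {c : Char}
    (h : PySem.Chars.isalpha c = false) :
    fwls_capFirst (cur ++ [c]) = fwls_capFirst cur ++ [c] := by
  induction cur with
  | nil => simp [fwls_capFirst, h]
  | cons x t ih =>
    by_cases hx : PySem.Chars.isalpha x = true
    · simp [fwls_capFirst, hx]
    · simp only [List.cons_append, fwls_capFirst, hx]
      simp [ih]

lemma capFirst_append_alpha {cur : List Char} {c : Char}
    (hcur : cur.any PySem.Chars.isalpha = false) (hc : PySem.Chars.isalpha c = true) :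
    fwls_capFirst (cur ++ [c]) = cur ++ [PySem.Chars.upperChar c] := by
  induction cur with
  | nil => simp [fwls_capFirst, hc]
  | cons x t ih =>
    rw [List.any_cons, Bool.or_eq_false_iff] at hcur
    simp [fwls_capFirst, hcur.1, ih hcur.2]

lemma capFirst_append_any {cur : List Char} (c : Char)
    (h : cur.any PySem.Chars.isalpha = true) :
    fwls_capFirst (cur ++ [c]) = fwls_capFirst cur ++ [c] := by
  induction cur with
  | nil => simp at h
  | cons x t ih =>
    by_cases hx : PySem.Chars.isalpha x = true
    · simp [fwls_capFirst, hx]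
    · rw [List.any_cons, Bool.or_eq_true] at h
      cases h with
      | inl h => exact absurd h hx
      | inr h => simp [fwls_capFirst, hx, ih h]

lemma term_not_alpha {c : Char} (h : pvIsTerm c = true) :
    PySem.Chars.isalpha c = false := by
  unfold pvIsTerm at h
  simp at h
  rcases h with h | h | h <;> subst h <;> decide

-- ----- B's segmentation equals fwlsGo -----
lemma fwls_foldB :
    ∀ (d cur : List Char),
      ((fwls_segs d cur).map fwls_capFirst).flatten
        = fwls_capFirst cur ++ fwlsGo (!(cur.any PySem.Chars.isalpha)) d := by
  intro d
  induction d with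
  | nil =>
    intro cur
    by_cases h : cur.isEmpty
    · rw [List.isEmpty_iff] at h
      subst h; simp [fwls_segs, fwlsGo, fwls_capFirst]
    · simp [fwls_segs, h, fwlsGo]
  | cons c rest ih =>
    intro cur
    have hgo : ∀ cap : Bool, fwlsGo cap (c :: rest)
        = if (cap && PySem.Chars.isalpha c) = true
          then PySem.Chars.upperChar c :: fwlsGo false rest
          else c :: fwlsGo (if (pvIsTerm c && pvAtBoundary rest) = true then true else cap) rest :=
      fun _ => rfl
    have hseg : fwls_segs (c :: rest) cur
        = if (pvIsTerm c && pvAtBoundary rest) = true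
          then (cur ++ [c]) :: fwls_segs rest []
          else fwls_segs rest (cur ++ [c]) := rfl
    have hanyapp : (cur ++ [c]).any PySem.Chars.isalpha
        = (cur.any PySem.Chars.isalpha || PySem.Chars.isalpha c) := by
      simp [List.any_append]
    by_cases hb : (pvIsTerm c && pvAtBoundary rest) = true
    · have hterm : pvIsTerm c = true := by revert hb; cases pvIsTerm c <;> simp
      have hna := term_not_alpha hterm
      rw [hseg, if_pos hb, List.map_cons, List.flatten_cons, ih [], hgo,
          if_neg (by simp [hna]), if_pos hb, capFirst_append_nonalpha hna]
      simp [fwls_capFirst]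
    · rw [hseg, if_neg hb, ih (cur ++ [c]), hgo]
      by_cases hc : PySem.Chars.isalpha c = true
      · by_cases hany : cur.any PySem.Chars.isalpha = true
        · rw [capFirst_append_any c hany, if_neg (by simp [hany]), if_neg hb]
          simp [hanyapp, hany]
        · have hany' : cur.any PySem.Chars.isalpha = false := by
            revert hany; cases cur.any PySem.Chars.isalpha <;> simp
          rw [capFirst_append_alpha hany' hc, if_pos (by simp [hany', hc]),
              capFirst_no_alpha hany']
          simp [hanyapp, hany', hc]
      · have hc' : PySem.Chars.isalpha c = false := by
          revert hc; cases PySem.Chars.isalpha c <;> simp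
        rw [capFirst_append_nonalpha hc', if_neg (by simp [hc']), if_neg hb]
        simp [hanyapp, hc']

-- the two cores agree on any char list
lemma fwls_core_eq (cs : List Char) :
    ((PySem.List.enumerate cs 0).foldl (fwls_step cs) ([], true)).1
      = ((fwls_segs cs []).map fwls_capFirst).flatten := by
  have hA := fwls_foldA cs cs 0 (by simp) [] true
  have hB := fwls_foldB cs []
  simp only [Nat.cast_zero] at hA
  rw [hA, hB]
  simp [fwls_capFirst]

-- ===== VERDICT (by name: the statement is the Claim_ definition above) =====
theorem format_wa_latin_sentence_spec : Claim_equal_format_wa_latin_sentence := by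
  intro latin_text np sc _
  unfold Spec_format_wa_latin_sentence format_wa_latin_sentence format_wa_latin_sentence_alt
  by_cases h0 : latin_text.toList.isEmpty
  · simp [h0]
  · simp only [h0]
    cases sc
    · simp
    · simp only [Bool.not_true]
      rw [fwls_core_eq]
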